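-- pv_equiv track=rewrite | github.com/canberkeh/Algorithms | triplet_prime_numbers.py | triplet_prime
-- ===== SOURCE A (Python) =====
-- def triplet_prime(num):
--     checklist = []
--     finallist = []
--     for i in range(2, num + 1):
--         for j in range(2, i):
--             if i % j == 0:
--                 break
--         else:
--             checklist.append(i)
--     for i in checklist:
--         if (i in checklist) and (i+2 in checklist) and (i+6 in checklist):
--             finallist.append([i, i+2, i+6])
--     return finallist
-- ===== SOURCE B (Python) =====
-- def triplet_prime(num):
--     # One pass with sqrt-bounded trial division; no prime list, no membership scans.
--     def is_prime(n):
--         j = 2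
--         while j * j <= n:
--             if n % j == 0:
--                 return False
--             j += 1
--         return True
--
--     result = []
--     for p in range(2, num - 5):
--         if is_prime(p) and is_prime(p + 2) and is_prime(p + 6):
--             result.append([p, p + 2, p + 6])
--     return result
-- ===== Notes on version B (the rewrite author's own statement) =====
-- stated objective: faster
-- what changed: Replaced the quadratic trial-division prime list plus O(n) membership scans by a single pass over candidates with sqrt-bounded trial division, testing p, p+2, p+6 directly.
import Mathlib
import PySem

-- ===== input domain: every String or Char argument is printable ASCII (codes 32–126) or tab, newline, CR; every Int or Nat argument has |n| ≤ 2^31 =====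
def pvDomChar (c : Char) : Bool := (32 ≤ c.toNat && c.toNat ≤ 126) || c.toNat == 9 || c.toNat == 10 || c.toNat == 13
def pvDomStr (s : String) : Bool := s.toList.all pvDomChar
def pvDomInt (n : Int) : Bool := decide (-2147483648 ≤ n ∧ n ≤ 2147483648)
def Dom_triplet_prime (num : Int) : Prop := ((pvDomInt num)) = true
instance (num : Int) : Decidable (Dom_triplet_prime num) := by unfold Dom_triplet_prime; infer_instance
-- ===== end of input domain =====

-- B replaces A's quadratic trial-division prime list plus linear membership scans by a single
-- pass over candidates with sqrt-bounded trial division (objective: faster).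

-- ===== PORT A =====
def triplet_prime (num : Int) : List (List Int) :=
  let checklist : List Int :=
    (PySem.List.pyRange 2 (num + 1) 1).foldl (fun acc i =>
      if (PySem.List.pyRange 2 i 1).any (fun j => PySem.Int.mod i j == 0) then acc
      else acc ++ [i]) []
  checklist.foldl (fun acc i =>
    if checklist.contains i && checklist.contains (i + 2) && checklist.contains (i + 6) then
      acc ++ [[i, i + 2, i + 6]]
    else acc) []

-- ===== PORT B =====
-- the 'while j * j <= n' loop of Source B's is_prime
def isPrimeLoop (n j : Int) : Bool :=
  if j * j ≤ n then
    if PySem.Int.mod n j == 0 then false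
    else isPrimeLoop n (j + 1)
  else true
termination_by (n + 1 - j).toNat
decreasing_by
  have hj : j ≤ j * j := by nlinarith [mul_self_nonneg j, mul_self_nonneg (j - 1)]
  omega

def isPrimeB (n : Int) : Bool := isPrimeLoop n 2

def triplet_prime_alt (num : Int) : List (List Int) :=
  (PySem.List.pyRange 2 (num - 5) 1).foldl (fun acc p =>
    if isPrimeB p && isPrimeB (p + 2) && isPrimeB (p + 6) then
      acc ++ [[p, p + 2, p + 6]]
    else acc) []

-- ===== PRECONDITION & SPEC =====
def Spec_triplet_prime (num : Int) (out : List (List Int)) : Prop := out = triplet_prime_alt num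
instance (num : Int) (out : List (List Int)) : Decidable (Spec_triplet_prime num out) := by unfold Spec_triplet_prime; infer_instance

-- ===== CLAIM (what is proved, stated in full; the proofs are below) =====
def Claim_equal_triplet_prime : Prop := ∀ (num : Int), Dom_triplet_prime num → Spec_triplet_prime num (triplet_prime num)

-- ===== LEMMAS AND PROOFS =====

-- 'isPrimeLoop n j' succeeds iff no k ≥ j with k*k ≤ n divides n
lemma isPrimeLoop_iff (n j : Int) : 1 ≤ j →
    (isPrimeLoop n j = true ↔ ∀ k : Int, j ≤ k → k * k ≤ n → ¬ k ∣ n) := by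
  induction j using isPrimeLoop.induct (n := n) with
  | case1 j hle hdvd =>
    intro _
    rw [isPrimeLoop, if_pos hle, if_pos hdvd]
    rw [beq_iff_eq, PySem.Int.mod_eq_zero_iff_dvd] at hdvd
    simp only [Bool.false_eq_true, false_iff, not_forall]
    exact ⟨j, by simp [hle, hdvd]⟩
  | case2 j hle hdvd ih =>
    intro hj
    rw [isPrimeLoop, if_pos hle, if_neg hdvd]
    rw [ih (by omega)]
    constructor
    · intro h k hk hkk
      rcases eq_or_lt_of_le hk with rfl | h2
      · rw [beq_iff_eq, PySem.Int.mod_eq_zero_iff_dvd] at hdvd; exact fun hd => hdvd hd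
      · exact h k (by omega) hkk
    · intro h k hk hkk
      exact h k (by omega) hkk
  | case3 j hle =>
    intro hj
    rw [isPrimeLoop, if_neg hle]
    simp only [true_iff]
    intro k hk hkk hd
    have : j * j ≤ k * k := mul_le_mul hk hk (by omega) (by omega)
    omega

-- A's inner-loop test (the for/else over range(2, i)) as a predicate
def checkA (i : Int) : Bool := !(PySem.List.pyRange 2 i 1).any (fun j => PySem.Int.mod i j == 0)

lemma checkA_iff (i : Int) : checkA i = true ↔ ∀ j : Int, 2 ≤ j → j < i → ¬ j ∣ i := by
  simp [checkA, PySem.List.mem_pyRange_one, PySem.Int.mod_eq_zero_iff_dvd]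

-- full trial division agrees with sqrt-bounded trial division for i ≥ 2
lemma checkA_eq_isPrimeB (i : Int) (hi : 2 ≤ i) : checkA i = isPrimeB i := by
  rw [Bool.eq_iff_iff, checkA_iff, isPrimeB, isPrimeLoop_iff i 2 (by omega)]
  constructor
  · intro h k hk hkk hd
    have hki : k < i := by nlinarith
    exact h k hk hki hd
  · intro h j hj hji hd
    obtain ⟨m, hm⟩ := hd
    by_cases hjj : j * j ≤ i
    · exact h j hj hjj ⟨m, hm⟩
    · have hm2 : 2 ≤ m := by nlinarith
      have hmm : m * m ≤ i := by nlinarith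
      exact h m hm2 hmm ⟨j, by linarith [hm, mul_comm j m]⟩

lemma triplet_prime_eq_alt (num : Int) : triplet_prime num = triplet_prime_alt num := by
  unfold triplet_prime triplet_prime_alt
  have h1 : (PySem.List.pyRange 2 (num + 1) 1).foldl (fun acc i =>
      if (PySem.List.pyRange 2 i 1).any (fun j => PySem.Int.mod i j == 0) then acc
      else acc ++ [i]) []
      = (PySem.List.pyRange 2 (num + 1) 1).filter checkA := by
    rw [show (fun (acc : List Int) i =>
        if (PySem.List.pyRange 2 i 1).any (fun j => PySem.Int.mod i j == 0) then acc
        else acc ++ [i]) = (fun acc i => if checkA i then acc ++ [i] else acc) by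
      funext acc i
      by_cases h : (PySem.List.pyRange 2 i 1).any (fun j => PySem.Int.mod i j == 0) = true <;>
        simp [checkA, h]]
    rw [PySem.List.foldl_append_if_eq_filter]
    simp
  simp only [h1]
  set checklist := (PySem.List.pyRange 2 (num + 1) 1).filter checkA with hcl
  rw [PySem.List.foldl_append_if
    (p := fun i => checklist.contains i && checklist.contains (i + 2) && checklist.contains (i + 6))
    (f := fun i => [i, i + 2, i + 6])]
  rw [PySem.List.foldl_append_if (p := fun p => isPrimeB p && isPrimeB (p + 2) && isPrimeB (p + 6))
    (f := fun p => [p, p + 2, p + 6])]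
  simp only [List.nil_append]
  congr 1
  have hcon : ∀ x : Int, checklist.contains x =
      (decide (2 ≤ x) && decide (x < num + 1) && checkA x) := by
    intro x
    rw [Bool.eq_iff_iff]
    simp [hcl, List.mem_filter, PySem.List.mem_pyRange_one, and_assoc]
  rw [List.filter_filter]
  by_cases hnum : 2 ≤ num - 5
  · rw [PySem.List.pyRange_one_append 2 (num - 5) (num + 1) hnum (by omega)]
    rw [List.filter_append]
    have h2 : (PySem.List.pyRange (num - 5) (num + 1) 1).filter
        (fun a => (checklist.contains a && checklist.contains (a + 2) && checklist.contains (a + 6)) && checkA a) = [] := by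
      rw [List.filter_eq_nil_iff]
      intro a ha hc
      rw [PySem.List.mem_pyRange_one] at ha
      simp only [Bool.and_eq_true] at hc
      obtain ⟨⟨⟨hx1, hx2⟩, h6⟩, hx3⟩ := hc
      rw [hcon (a + 6)] at h6
      simp only [Bool.and_eq_true, decide_eq_true_eq] at h6
      obtain ⟨⟨_, h6b⟩, _⟩ := h6
      omega
    rw [h2, List.append_nil]
    apply List.filter_congr
    intro a ha
    rw [PySem.List.mem_pyRange_one] at ha
    have d1 : decide ((2:Int) ≤ a) = true := decide_eq_true (by omega)
    have d2 : decide (a < num + 1) = true := decide_eq_true (by omega)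
    have d3 : decide ((2:Int) ≤ a + 2) = true := decide_eq_true (by omega)
    have d4 : decide (a + 2 < num + 1) = true := decide_eq_true (by omega)
    have d5 : decide ((2:Int) ≤ a + 6) = true := decide_eq_true (by omega)
    have d6 : decide (a + 6 < num + 1) = true := decide_eq_true (by omega)
    rw [hcon a, hcon (a + 2), hcon (a + 6),
        ← checkA_eq_isPrimeB a (by omega), ← checkA_eq_isPrimeB (a + 2) (by omega),
        ← checkA_eq_isPrimeB (a + 6) (by omega), d1, d2, d3, d4, d5, d6]
    cases checkA a <;> cases checkA (a + 2) <;> cases checkA (a + 6) <;> simp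
  · have hr : PySem.List.pyRange 2 (num - 5) 1 = [] := by
      rw [PySem.List.pyRange_one]
      have h0 : (num - 5 - 2).toNat = 0 := by omega
      simp [h0]
    rw [hr, List.filter_nil, List.filter_eq_nil_iff]
    intro a ha hc
    rw [PySem.List.mem_pyRange_one] at ha
    simp only [Bool.and_eq_true] at hc
    obtain ⟨⟨⟨hx1, hx2⟩, h6⟩, hx3⟩ := hc
    rw [hcon (a + 6)] at h6
    simp only [Bool.and_eq_true, decide_eq_true_eq] at h6
    obtain ⟨⟨_, h6b⟩, _⟩ := h6
    omega

-- ===== VERDICT (by name: the statement is the Claim_ definition above) =====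
theorem triplet_prime_spec : Claim_equal_triplet_prime := by
  intro num _
  exact triplet_prime_eq_alt num
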